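-- pv_equiv track=rewrite | github.com/kaiiam/UO_revamp | qname_processing/qname.py | extract_qname_symbol
-- ===== SOURCE A (Python) =====
-- def reverse(text):
--     """https://stackoverflow.com/questions/7961499/best-way-to-loop-over-a-python-string-backwards"""
--     rev = ''
--     for i in range(len(text), 0, -1):
--         rev += text[i - 1]
--     return rev
--
-- def extract_qname_symbol(in_str, unit_keys):
--     """Given an input string extract and return any existing unit_key
--     else return None
--     """
--     val = ''
--     key = ''
--     for x in reverse(in_str):
--         val += x
--         rev_val = reverse(val)
--         if rev_val in unit_keys:
--             key = rev_val
--
--     if key is not '':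
--         return key
--     else:
--         return None
-- ===== SOURCE B (Python) =====
-- def extract_qname_symbol(in_str, unit_keys):
--     """Given an input string extract and return any existing unit_key
--     else return None
--     """
--     best = None
--     best_len = 0
--     for key in unit_keys:
--         if len(key) > best_len and in_str.endswith(key):
--             best = key
--             best_len = len(key)
--     return best
-- ===== Notes on version B (the rewrite author's own statement) =====
-- stated objective: faster
-- what changed: A builds every suffix of in_str (each via a character-by-character string reverse, quadratic in the suffix length) and tests membership in unit_keys keeping the last hit; B makes one pass over unit_keys keeping the longest key that in_str endswith, with a best_len guard starting at 0 so an empty key is never returned, just as A never tests a zero-length suffix.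
import Mathlib
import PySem

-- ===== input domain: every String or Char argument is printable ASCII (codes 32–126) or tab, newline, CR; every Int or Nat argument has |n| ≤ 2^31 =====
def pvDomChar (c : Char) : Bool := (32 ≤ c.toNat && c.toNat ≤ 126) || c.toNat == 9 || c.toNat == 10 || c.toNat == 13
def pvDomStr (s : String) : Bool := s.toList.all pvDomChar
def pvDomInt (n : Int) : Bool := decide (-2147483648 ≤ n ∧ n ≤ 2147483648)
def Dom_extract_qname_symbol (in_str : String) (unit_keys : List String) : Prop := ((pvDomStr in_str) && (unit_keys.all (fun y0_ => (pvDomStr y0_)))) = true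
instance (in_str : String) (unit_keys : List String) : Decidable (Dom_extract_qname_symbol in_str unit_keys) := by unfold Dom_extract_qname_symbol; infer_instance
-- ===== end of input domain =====

-- B replaces A's scan over every suffix of in_str (each rebuilt by a quadratic string reverse)
-- with one pass over unit_keys keeping the longest key that in_str ends with (objective: faster; measured).

-- ===== PORT A =====
-- Python helper `reverse(text)`: rev = ''; for i in range(len(text), 0, -1): rev += text[i-1].
-- Ported on List Char (strings are handled via .toList throughout, as PySem prescribes); the loop
-- body appends the single character text[i-1]: pyGet? is in range for every visited i, and
-- `.toList` turns `some c` into `[c]`, exactly the appended character.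
def pyReverseChars (t : List Char) : List Char :=
  (PySem.List.pyRange (t.length : Int) 0 (-1)).foldl
    (fun rev i => rev ++ (PySem.List.pyGet? t (i - 1)).toList) []

-- A: val = ''; key = ''; for x in reverse(in_str): val += x; rev_val = reverse(val);
--    if rev_val in unit_keys: key = rev_val;  return key if key is not '' else None.
def extract_qname_symbol (in_str : String) (unit_keys : List String) : Option String :=
  let st := (pyReverseChars in_str.toList).foldl
    (fun (st : List Char × List Char) x =>
      let val := st.1 ++ [x]
      let rev_val := pyReverseChars val
      if unit_keys.contains (String.ofList rev_val) then (val, rev_val) else (val, st.2))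
    ([], [])
  if st.2 ≠ [] then some (String.ofList st.2) else none

-- ===== PORT B =====
-- B: best = None; best_len = 0; for key in unit_keys:
--      if len(key) > best_len and in_str.endswith(key): best, best_len = key, len(key);  return best.
def extract_qname_symbol_alt (in_str : String) (unit_keys : List String) : Option String :=
  (unit_keys.foldl
    (fun (st : Option String × Nat) key =>
      if decide (st.2 < key.toList.length) && PySem.Str.endswith in_str key
      then (some key, key.toList.length) else st)
    (none, 0)).1

-- ===== PRECONDITION & SPEC =====
def Spec_extract_qname_symbol (in_str : String) (unit_keys : List String) (out : Option String) : Prop := out = extract_qname_symbol_alt in_str unit_keys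
instance (in_str : String) (unit_keys : List String) (out : Option String) : Decidable (Spec_extract_qname_symbol in_str unit_keys out) := by unfold Spec_extract_qname_symbol; infer_instance

-- ===== CLAIM (what is proved, stated in full; the proofs are below) =====
def Claim_equal_extract_qname_symbol : Prop := ∀ (in_str : String) (unit_keys : List String), Dom_extract_qname_symbol in_str unit_keys → Spec_extract_qname_symbol in_str unit_keys (extract_qname_symbol in_str unit_keys)

-- ===== LEMMAS AND PROOFS =====

-- the suffix of s of length j (for j ≤ s.length)
def sfx (s : List Char) (j : Nat) : List Char := s.drop (s.length - j)

-- A's key after scanning the j shortest suffixes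
def fA (uk : List String) (s : List Char) : Nat → List Char
  | 0 => []
  | j+1 => if uk.contains (String.ofList (sfx s (j+1))) then sfx s (j+1) else fA uk s j

theorem pyRange_down_succ (m : Nat) :
    PySem.List.pyRange ((m:Int)+1) 0 (-1) = ((m:Int)+1) :: PySem.List.pyRange (m:Int) 0 (-1) := by
  simp only [PySem.List.pyRange_neg_one, sub_zero, Int.toNat_natCast_add_one, Int.toNat_natCast]
  rw [List.range_succ_eq_map]
  simp only [List.map_cons, List.map_map, Nat.cast_zero, sub_zero]
  congr 1
  apply List.map_congr_left; intro k hk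
  simp [Function.comp]

theorem revfold (t : List Char) (m : Nat) (hm : m ≤ t.length) (acc : List Char) :
    (PySem.List.pyRange (m:Int) 0 (-1)).foldl
      (fun rev i => rev ++ (PySem.List.pyGet? t (i - 1)).toList) acc
      = acc ++ (t.take m).reverse := by
  induction m generalizing acc with
  | zero => simp [PySem.List.pyRange]
  | succ j ih =>
      rw [Nat.cast_add, Nat.cast_one, pyRange_down_succ, List.foldl_cons]
      have h1 : ((j:Int)+1-1) = ((j:Nat):Int) := by ring
      rw [h1, PySem.List.pyGet?_natCast]
      have hj : j < t.length := hm
      rw [ih (le_of_lt hj)]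
      rw [List.take_add_one, List.getElem?_eq_getElem hj, List.reverse_append]
      simp [List.append_assoc]

theorem pyReverseChars_eq (t : List Char) : pyReverseChars t = t.reverse := by
  rw [pyReverseChars, revfold t t.length le_rfl]
  simp

-- (s.reverse.take j).reverse = sfx s j
theorem rev_take_rev (s : List Char) (j : Nat) : (s.reverse.take j).reverse = sfx s j := by
  unfold sfx
  rw [List.take_reverse]
  simp

theorem A_fold (uk : List String) (s : List Char) (j : Nat) (hj : j ≤ s.length) :
    ((s.reverse.take j).foldl
      (fun (st : List Char × List Char) x =>
        let val := st.1 ++ [x]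
        let rev_val := pyReverseChars val
        if uk.contains (String.ofList rev_val) then (val, rev_val) else (val, st.2))
      ([], [])) = (s.reverse.take j, fA uk s j) := by
  induction j with
  | zero => simp [fA]
  | succ i ih =>
      have hi : i < s.length := hj
      have hi' : i < s.reverse.length := by simpa using hi
      rw [List.take_add_one, List.getElem?_eq_getElem hi', List.foldl_append, ih (le_of_lt hi)]
      show (if uk.contains (String.ofList (pyReverseChars (s.reverse.take i ++ [s.reverse[i]]))) then _ else _) = _
      have hcat : s.reverse.take i ++ [s.reverse[i]] = s.reverse.take (i+1) := by
        rw [List.take_add_one, List.getElem?_eq_getElem hi']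
        rfl
      rw [hcat, pyReverseChars_eq, rev_take_rev]
      show _ = (s.reverse.take i ++ (some s.reverse[i]).toList, fA uk s (i+1))
      have hcat2 : s.reverse.take i ++ (some s.reverse[i]).toList = s.reverse.take (i+1) := hcat
      rw [hcat2]
      show (if uk.contains (String.ofList (sfx s (i+1))) = true then _ else _) = _
      rw [show fA uk s (i+1) = if uk.contains (String.ofList (sfx s (i+1))) then sfx s (i+1) else fA uk s i from rfl]
      split <;> simp

theorem suffix_eq_sfx (l s : List Char) (h : l <:+ s) : l = sfx s l.length := by
  obtain ⟨t, rfl⟩ := h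
  simp [sfx]

theorem sfx_suffix (s : List Char) (j : Nat) : sfx s j <:+ s := List.drop_suffix _ s

theorem length_sfx (s : List Char) (j : Nat) (hj : j ≤ s.length) : (sfx s j).length = j := by
  simp [sfx]; omega

def Good (in_str : String) (uk : List String) (st : Option String × Nat) : Prop :=
  st = (none, 0) ∨
    (1 ≤ st.2 ∧ st.2 ≤ in_str.toList.length ∧
      st.1 = some (String.ofList (sfx in_str.toList st.2)) ∧
      String.ofList (sfx in_str.toList st.2) ∈ uk)

theorem B_mono (in_str : String) (ks : List String) (st : Option String × Nat) :
    st.2 ≤ (ks.foldl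
      (fun (st : Option String × Nat) key =>
        if decide (st.2 < key.toList.length) && PySem.Str.endswith in_str key
        then (some key, key.toList.length) else st) st).2 := by
  induction ks generalizing st with
  | nil => simp
  | cons k ks ih =>
      rw [List.foldl_cons]
      refine le_trans ?_ (ih _)
      split
      · next h => simp only [Bool.and_eq_true, decide_eq_true_eq] at h; omega
      · exact le_rfl

theorem endswith_sfx (in_str : String) (k : String) (h : PySem.Str.endswith in_str k = true) :
    k.toList = sfx in_str.toList k.toList.length := by
  rw [PySem.Str.endswith_eq] at h
  exact suffix_eq_sfx _ _ ((PySem.Chars.endswith_iff _ _).1 h)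

theorem B_fold (in_str : String) (uk : List String) (ks : List String) (st : Option String × Nat)
    (hks : ∀ k ∈ ks, k ∈ uk) (hg : Good in_str uk st) :
    Good in_str uk (ks.foldl
      (fun (st : Option String × Nat) key =>
        if decide (st.2 < key.toList.length) && PySem.Str.endswith in_str key
        then (some key, key.toList.length) else st) st) ∧
    ∀ k ∈ ks, PySem.Str.endswith in_str k = true →
      k.toList.length ≤ (ks.foldl
        (fun (st : Option String × Nat) key =>
          if decide (st.2 < key.toList.length) && PySem.Str.endswith in_str key
          then (some key, key.toList.length) else st) st).2 := by
  induction ks generalizing st with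
  | nil => exact ⟨hg, by simp⟩
  | cons k ks ih =>
      rw [List.foldl_cons]
      have hk : k ∈ uk := hks k (by simp)
      have hgood' : Good in_str uk
          (if decide (st.2 < k.toList.length) && PySem.Str.endswith in_str k
           then (some k, k.toList.length) else st) := by
        split
        · next h =>
            simp only [Bool.and_eq_true, decide_eq_true_eq] at h
            obtain ⟨hlt, hend⟩ := h
            right
            have hkl := endswith_sfx in_str k hend
            have hsuf : k.toList <:+ in_str.toList := (PySem.Chars.endswith_iff _ _).1
              (by rw [PySem.Str.endswith_eq] at hend; exact hend)
            have hlen : k.toList.length ≤ in_str.toList.length := hsuf.length_le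
            refine ⟨by omega, hlen, ?_, ?_⟩
            · show some k = some (String.ofList (sfx in_str.toList k.toList.length))
              rw [← hkl, String.ofList_toList]
            · show String.ofList (sfx in_str.toList k.toList.length) ∈ uk
              rw [← hkl, String.ofList_toList]; exact hk
        · exact hg
      obtain ⟨hG, hB⟩ := ih _ (fun x hx => hks x (by simp [hx])) hgood'
      refine ⟨hG, ?_⟩
      intro x hx hend
      rcases List.mem_cons.1 hx with rfl | hx'
      · -- x = k: its length is ≤ state's .2 right after its own step, then B_mono
        refine le_trans ?_ (B_mono in_str ks _)
        split
        · next h => simp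
        · next h =>
            simp only [Bool.and_eq_true, decide_eq_true_eq, not_and] at h
            by_cases hlt : st.2 < x.toList.length
            · rw [PySem.Str.endswith_eq] at hend
              have hf := h (by simpa using hlt)
              simp_all
            · omega
      · exact hB x hx' hend

theorem fA_nil (uk : List String) (s : List Char)
    (h : ∀ j, 1 ≤ j → j ≤ s.length → String.ofList (sfx s j) ∉ uk) :
    ∀ j, j ≤ s.length → fA uk s j = [] := by
  intro j
  induction j with
  | zero => intro _; rfl
  | succ i ih =>
      intro hj
      show (if uk.contains (String.ofList (sfx s (i+1))) then sfx s (i+1) else fA uk s i) = []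
      rw [if_neg (by simpa using h (i+1) (by omega) hj)]
      exact ih (by omega)

theorem fA_eq (uk : List String) (s : List Char) (m : Nat) (hm1 : 1 ≤ m)
    (hmem : String.ofList (sfx s m) ∈ uk)
    (hmax : ∀ j, m < j → j ≤ s.length → String.ofList (sfx s j) ∉ uk) :
    ∀ j, m ≤ j → j ≤ s.length → fA uk s j = sfx s m := by
  intro j
  induction j with
  | zero => intro h0 _; omega
  | succ i ih =>
      intro hmi hj
      show (if uk.contains (String.ofList (sfx s (i+1))) then sfx s (i+1) else fA uk s i) = _
      by_cases hc : m = i + 1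
      · subst hc
        rw [if_pos (by simpa using hmem)]
      · rw [if_neg (by simpa using hmax (i+1) (by omega) hj)]
        exact ih (by omega) (by omega)

theorem extract_qname_symbol_spec' (in_str : String) (uk : List String) :
    extract_qname_symbol in_str uk = extract_qname_symbol_alt in_str uk := by
  have hA : extract_qname_symbol in_str uk =
      (if fA uk in_str.toList in_str.toList.length ≠ [] then
        some (String.ofList (fA uk in_str.toList in_str.toList.length)) else none) := by
    unfold extract_qname_symbol
    rw [pyReverseChars_eq]
    rw [show in_str.toList.reverse = in_str.toList.reverse.take in_str.toList.length by simp]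
    rw [A_fold uk in_str.toList in_str.toList.length le_rfl]
  obtain ⟨hG, hmax⟩ := B_fold in_str uk uk (none, 0) (fun _ h => h) (Or.inl rfl)
  rw [hA]
  unfold extract_qname_symbol_alt
  rcases hG with hnone | ⟨h1, h2, h3, h4⟩
  · rw [hnone] at hmax ⊢
    rw [fA_nil uk in_str.toList ?_ in_str.toList.length le_rfl]
    · simp
    · intro j hj1 hj2 hmem
      have hend : PySem.Str.endswith in_str (String.ofList (sfx in_str.toList j)) = true := by
        rw [PySem.Str.endswith_eq]
        exact (PySem.Chars.endswith_iff _ _).2 (by rw [String.toList_ofList]; exact sfx_suffix _ _)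
      have := hmax _ hmem hend
      rw [String.toList_ofList, length_sfx _ _ hj2] at this
      omega
  · rw [h3]
    have hmax' : ∀ j, (List.foldl
        (fun (st : Option String × Nat) key =>
          if decide (st.2 < key.toList.length) && PySem.Str.endswith in_str key
          then (some key, key.toList.length) else st) (none, 0) uk).2 < j →
        j ≤ in_str.toList.length →
        String.ofList (sfx in_str.toList j) ∉ uk := by
      intro j hj1 hj2 hmem
      have hend : PySem.Str.endswith in_str (String.ofList (sfx in_str.toList j)) = true := by
        rw [PySem.Str.endswith_eq]
        exact (PySem.Chars.endswith_iff _ _).2 (by rw [String.toList_ofList]; exact sfx_suffix _ _)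
      have := hmax _ hmem hend
      rw [String.toList_ofList, length_sfx _ _ hj2] at this
      omega
    rw [fA_eq uk in_str.toList _ h1 h4 hmax' in_str.toList.length h2 le_rfl]
    have hl := length_sfx in_str.toList _ h2
    rw [if_pos (List.length_pos_iff.mp (by rw [hl]; omega))]

-- ===== VERDICT (by name: the statement is the Claim_ definition above) =====
theorem extract_qname_symbol_spec : Claim_equal_extract_qname_symbol := by
  intro in_str unit_keys _
  exact extract_qname_symbol_spec' in_str unit_keys
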